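-- pv_equiv track=rewrite | github.com/Kims-DeveloperGroup/sprint-runtime | core/git_ops.py | _parse_status_paths
-- ===== SOURCE A (Python) =====
-- def _decode_git_quoted_path(path_text: str) -> str:
--     normalized = str(path_text or "").strip()
--     if len(normalized) < 2 or not (normalized.startswith('"') and normalized.endswith('"')):
--         return normalized
--
--     body = normalized[1:-1]
--     raw_bytes = bytearray()
--     index = 0
--     simple_escapes = {
--         "a": 0x07,
--         "b": 0x08,
--         "f": 0x0C,
--         "n": 0x0A,
--         "r": 0x0D,
--         "t": 0x09,
--         "v": 0x0B,
--         "\\": 0x5C,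
--         '"': 0x22,
--     }
--
--     while index < len(body):
--         char = body[index]
--         if char != "\\":
--             raw_bytes.extend(char.encode("utf-8"))
--             index += 1
--             continue
--         index += 1
--         if index >= len(body):
--             raw_bytes.append(0x5C)
--             break
--         escaped = body[index]
--         if escaped in simple_escapes:
--             raw_bytes.append(simple_escapes[escaped])
--             index += 1
--             continue
--         if escaped in "01234567":
--             octal_digits = [escaped]
--             index += 1
--             for _ in range(2):
--                 if index < len(body) and body[index] in "01234567":
--                     octal_digits.append(body[index])
--                     index += 1
--                 else:
--                     break
--             raw_bytes.append(int("".join(octal_digits), 8))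
--             continue
--         raw_bytes.extend(escaped.encode("utf-8"))
--         index += 1
--
--     return raw_bytes.decode("utf-8", errors="surrogateescape")
--
-- def _parse_status_paths(status_output: str) -> set[str]:
--     paths: set[str] = set()
--     for raw_line in status_output.splitlines():
--         line = raw_line.rstrip()
--         if len(line) < 4:
--             continue
--         body = line[3:]
--         if " -> " in body:
--             body = body.split(" -> ", 1)[1]
--         normalized = _decode_git_quoted_path(body.strip())
--         if normalized:
--             paths.add(normalized)
--     return paths
-- ===== SOURCE B (Python) =====
-- def _decode_git_quoted_path(path_text: str) -> str:
--     normalized = str(path_text or "").strip()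
--     if len(normalized) < 2 or not (normalized.startswith('"') and normalized.endswith('"')):
--         return normalized
--
--     simple_escapes = {
--         "a": 0x07, "b": 0x08, "f": 0x0C, "n": 0x0A, "r": 0x0D,
--         "t": 0x09, "v": 0x0B, "\\": 0x5C, '"': 0x22,
--     }
--     # Tokenize by splitting on the escape character: every token after the first
--     # starts right after a backslash, so its head (if any) is the escaped char.
--     tokens = normalized[1:-1].split("\\")
--     raw_bytes = bytearray(tokens[0].encode("utf-8"))
--     i = 1
--     while i < len(tokens):
--         tok = tokens[i]
--         if not tok:
--             # escaped backslash (the following token is then literal),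
--             # or a lone backslash at the very end of the body
--             raw_bytes.append(0x5C)
--             if i + 1 < len(tokens):
--                 i += 1
--                 raw_bytes.extend(tokens[i].encode("utf-8"))
--         elif tok[0] in simple_escapes:
--             raw_bytes.append(simple_escapes[tok[0]])
--             raw_bytes.extend(tok[1:].encode("utf-8"))
--         elif tok[0] in "01234567":
--             j = 1
--             while j < min(3, len(tok)) and tok[j] in "01234567":
--                 j += 1
--             raw_bytes.append(int(tok[:j], 8))
--             raw_bytes.extend(tok[j:].encode("utf-8"))
--         else:
--             raw_bytes.extend(tok.encode("utf-8"))
--         i += 1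
--
--     return raw_bytes.decode("utf-8", errors="surrogateescape")
--
--
-- def _parse_status_paths(status_output: str) -> set[str]:
--     def target(line: str) -> str:
--         body = line[3:]
--         if " -> " in body:
--             body = body.split(" -> ", 1)[1]
--         return _decode_git_quoted_path(body.strip())
--
--     lines = [raw.rstrip() for raw in status_output.splitlines()]
--     return {p for p in (target(l) for l in lines if len(l) >= 4) if p}
-- ===== Notes on version B (the rewrite author's own statement) =====
-- stated objective: alternative
-- what changed: The quoted-path decoder is re-expressed as split-on-backslash tokenization (every token after the first starts with the escaped character) instead of A's cursor/lookahead state machine, and the status parse becomes a set comprehension over a filtered list of lines instead of an accumulating loop; Pre_ excludes only inputs where A raises ValueError (octal escape > 0o377) or returns a str containing lone surrogate characters from its error-tolerant byte decode, which is not a value of the Lean String type.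
-- outside the precondition, e.g. on _parse_status_paths('?? "\\777"'): A raises ValueError, B raises ValueError
import Mathlib
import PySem

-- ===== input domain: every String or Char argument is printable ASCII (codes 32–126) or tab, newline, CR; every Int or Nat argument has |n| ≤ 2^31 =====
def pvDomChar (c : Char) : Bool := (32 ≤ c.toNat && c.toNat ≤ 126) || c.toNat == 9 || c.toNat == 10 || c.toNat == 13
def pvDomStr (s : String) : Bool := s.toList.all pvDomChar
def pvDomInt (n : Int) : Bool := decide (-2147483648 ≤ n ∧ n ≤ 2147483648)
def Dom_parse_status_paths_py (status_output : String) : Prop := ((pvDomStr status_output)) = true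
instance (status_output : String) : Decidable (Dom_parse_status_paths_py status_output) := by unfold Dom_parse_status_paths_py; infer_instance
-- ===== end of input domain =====

-- B replaces A's cursor/lookahead escape-decoding state machine by split-on-backslash
-- tokenization and the accumulating parse loop by a filtered comprehension (objective: alternative).

-- ===== PORT A =====
-- helpers shared by both ports (identical lines in both Pythons):
-- the simple_escapes dict, octal-digit test, int("..", 8) digit arithmetic,
-- the bytes.decode("utf-8", errors="surrogateescape") step (exact for ASCII and valid
-- UTF-8 sequences, which is all Pre_ admits; the Char.ofNat 0 branches stand in for the
-- surrogate-escape outputs, which no Lean Char can represent and Pre_ excludes),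
-- and the `if " -> " in body: body = body.split(" -> ", 1)[1]` step.
def pvSimpleEscape (c : Char) : Option Nat :=
  if c = 'a' then some 7 else if c = 'b' then some 8 else if c = 'f' then some 12
  else if c = 'n' then some 10 else if c = 'r' then some 13 else if c = 't' then some 9
  else if c = 'v' then some 11 else if c = '\\' then some 92 else if c = '"' then some 34
  else none

def pvIsOct (c : Char) : Bool := decide ('0' ≤ c) && decide (c ≤ '7')
def pvOct1 (a : Char) : Nat := a.toNat - 48
def pvOct2 (a b : Char) : Nat := (a.toNat - 48) * 8 + (b.toNat - 48)
def pvOct3 (a b c : Char) : Nat := ((a.toNat - 48) * 8 + (b.toNat - 48)) * 8 + (c.toNat - 48)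

-- UTF-8 continuation-byte test and the lead-dependent range of the first continuation byte
def pvContB (b : Nat) : Bool := decide (128 ≤ b) && decide (b ≤ 191)
def pvLead3Lo (b : Nat) : Nat := if b = 224 then 160 else 128
def pvLead3Hi (b : Nat) : Nat := if b = 237 then 159 else 191
def pvLead4Lo (b : Nat) : Nat := if b = 240 then 144 else 128
def pvLead4Hi (b : Nat) : Nat := if b = 244 then 143 else 191

-- bytes.decode("utf-8", errors="surrogateescape"): exact on ASCII/valid UTF-8;
-- invalid bytes (surrogateescape in Python) yield placeholder Char.ofNat 0 — outside Pre_.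
def pvDecodeBytes : List Nat → List Char
  | [] => []
  | b :: rest =>
    if b < 128 then Char.ofNat b :: pvDecodeBytes rest
    else if 194 ≤ b && b ≤ 223 then
      match rest with
      | c1 :: r =>
        if pvContB c1 then Char.ofNat ((b - 192) * 64 + (c1 - 128)) :: pvDecodeBytes r
        else Char.ofNat 0 :: pvDecodeBytes (c1 :: r)
      | [] => [Char.ofNat 0]
    else if 224 ≤ b && b ≤ 239 then
      match rest with
      | c1 :: c2 :: r =>
        if (decide (pvLead3Lo b ≤ c1) && decide (c1 ≤ pvLead3Hi b)) && pvContB c2 then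
          Char.ofNat (((b - 224) * 64 + (c1 - 128)) * 64 + (c2 - 128)) :: pvDecodeBytes r
        else Char.ofNat 0 :: pvDecodeBytes (c1 :: c2 :: r)
      | r => Char.ofNat 0 :: r.map (fun _ => Char.ofNat 0)
    else if 240 ≤ b && b ≤ 244 then
      match rest with
      | c1 :: c2 :: c3 :: r =>
        if ((decide (pvLead4Lo b ≤ c1) && decide (c1 ≤ pvLead4Hi b)) && pvContB c2) && pvContB c3 then
          Char.ofNat ((((b - 240) * 64 + (c1 - 128)) * 64 + (c2 - 128)) * 64 + (c3 - 128)) :: pvDecodeBytes r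
        else Char.ofNat 0 :: pvDecodeBytes (c1 :: c2 :: c3 :: r)
      | r => Char.ofNat 0 :: r.map (fun _ => Char.ofNat 0)
    else Char.ofNat 0 :: pvDecodeBytes rest
termination_by l => l.length
decreasing_by all_goals (simp only [List.length_cons]; omega)

def pvArrowTail (body : List Char) : List Char :=
  if PySem.Chars.isIn (' ' :: '-' :: '>' :: ' ' :: []) body then
    match PySem.Chars.splitMax? body (' ' :: '-' :: '>' :: ' ' :: []) 1 with
    | some parts => (PySem.List.pyGet? parts 1).getD []
    | none => []
  else body

-- A's while loop over `body` with cursor `index`, as structural recursion on the suffix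
def pvDecLoopA : List Char → List Nat
  | [] => []
  | c :: rest =>
    if c ≠ '\\' then c.toNat :: pvDecLoopA rest
    else
      match rest with
      | [] => 92 :: []
      | e :: rest2 =>
        match pvSimpleEscape e with
        | some b => b :: pvDecLoopA rest2
        | none =>
          if pvIsOct e then
            match rest2 with
            | [] => pvOct1 e :: pvDecLoopA []
            | d2 :: rest3 =>
              if pvIsOct d2 then
                match rest3 with
                | [] => pvOct2 e d2 :: pvDecLoopA []
                | d3 :: rest4 =>
                  if pvIsOct d3 then pvOct3 e d2 d3 :: pvDecLoopA rest4
                  else pvOct2 e d2 :: pvDecLoopA (d3 :: rest4)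
              else pvOct1 e :: pvDecLoopA (d2 :: rest3)
          else e.toNat :: pvDecLoopA rest2
termination_by cs => cs.length
decreasing_by all_goals (simp only [List.length_cons]; omega)

def pvDecodeQuotedA (path_text : List Char) : List Char :=
  let normalized := PySem.Chars.strip path_text
  if normalized.length < 2
     || !(PySem.Chars.startswith normalized ['"'] && PySem.Chars.endswith normalized ['"']) then
    normalized
  else
    pvDecodeBytes (pvDecLoopA (PySem.List.slice normalized (some 1) (some (-1))))

def parse_status_paths_py (status_output : String) : List String :=
  (PySem.Chars.splitlines status_output.toList).foldl
    (fun paths raw_line =>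
      let line := PySem.Chars.rstrip raw_line
      if line.length < 4 then paths
      else
        let body := pvArrowTail (PySem.List.slice line (some 3) none)
        let normalized := pvDecodeQuotedA (PySem.Chars.strip body)
        if normalized.isEmpty then paths
        else PySem.Set.add paths (String.ofList normalized))
    ([] : PySem.Set String)

-- ===== PORT B =====
-- one non-empty token that follows a backslash: head is the escaped char
def pvDecTokB (tok : List Char) : List Nat :=
  match tok with
  | [] => []
  | c :: cs =>
    match pvSimpleEscape c with
    | some b => b :: cs.map Char.toNat
    | none =>
      if pvIsOct c then
        match cs with
        | [] => pvOct1 c :: []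
        | d2 :: cs2 =>
          if pvIsOct d2 then
            match cs2 with
            | [] => pvOct2 c d2 :: []
            | d3 :: cs3 =>
              if pvIsOct d3 then pvOct3 c d2 d3 :: cs3.map Char.toNat
              else pvOct2 c d2 :: cs2.map Char.toNat
          else pvOct1 c :: cs.map Char.toNat
      else c.toNat :: cs.map Char.toNat

-- B's while loop over the tokens after the first
def pvDecLoopB : List (List Char) → List Nat
  | [] => []
  | [] :: rest =>
    92 :: (match rest with
           | [] => []
           | t :: rest' => t.map Char.toNat ++ pvDecLoopB rest')
  | (c :: cs) :: rest => pvDecTokB (c :: cs) ++ pvDecLoopB rest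

def pvDecodeQuotedB (path_text : List Char) : List Char :=
  let normalized := PySem.Chars.strip path_text
  if normalized.length < 2
     || !(PySem.Chars.startswith normalized ['"'] && PySem.Chars.endswith normalized ['"']) then
    normalized
  else
    match PySem.Chars.splitOn (PySem.List.slice normalized (some 1) (some (-1))) ['\\'] with
    | [] => []  -- unreachable: str.split never returns an empty list
    | t0 :: rest => pvDecodeBytes (t0.map Char.toNat ++ pvDecLoopB rest)

def pvTarget (line : List Char) : List Char :=
  pvDecodeQuotedB (PySem.Chars.strip (pvArrowTail (PySem.List.slice line (some 3) none)))

def parse_status_paths_py_alt (status_output : String) : List String :=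
  let lines := (PySem.Chars.splitlines status_output.toList).map PySem.Chars.rstrip
  let decoded := (lines.filter (fun l => decide (4 ≤ l.length))).map pvTarget
  PySem.Set.ofList ((decoded.filter (fun p => !p.isEmpty)).map String.ofList)

-- ===== PRECONDITION & SPEC =====
-- Pre_ excludes exactly the inputs on which A does not return an ordinary decodable value:
-- those where an octal escape in a quoted path exceeds 0o377 (bytearray.append raises
-- ValueError) and those where the escape bytes are not ASCII/valid UTF-8, so Python's
-- error-tolerant decode (surrogate escapes) returns a str containing lone surrogates, which is not a
-- value of the Lean type String. The check is a syntactic scan of each quoted path body by a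
-- finite-state machine: every byte an escape (or literal char) denotes that is ≥ 0x80 must
-- sit in a well-formed UTF-8 cluster, and no octal escape may exceed 0o377.
structure PvSt where
  fail : Bool   -- an ill-formed byte was seen
  mode : Nat    -- 0 = base, 1 = just after a backslash, 2 = inside an octal escape
  v : Nat       -- octal value so far (mode 2)
  k : Nat       -- octal digits consumed so far (mode 2)
  need : Nat    -- continuation bytes still required by an open UTF-8 cluster
  lo : Nat      -- admissible range of the next continuation byte
  hi : Nat
deriving DecidableEq, Repr

-- account for one denoted byte: continuation of an open cluster, ASCII, or a new lead
def pvEmit (st : PvSt) (b : Nat) : PvSt :=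
  if 0 < st.need then
    if st.lo ≤ b ∧ b ≤ st.hi then { st with mode := 0, need := st.need - 1, lo := 128, hi := 191 }
    else { st with fail := true, mode := 0, need := 0 }
  else if b < 128 then { st with mode := 0 }
  else if 194 ≤ b ∧ b ≤ 223 then { st with mode := 0, need := 1, lo := 128, hi := 191 }
  else if 224 ≤ b ∧ b ≤ 239 then { st with mode := 0, need := 2, lo := pvLead3Lo b, hi := pvLead3Hi b }
  else if 240 ≤ b ∧ b ≤ 244 then { st with mode := 0, need := 3, lo := pvLead4Lo b, hi := pvLead4Hi b }
  else { st with fail := true, mode := 0 }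

def pvStepBase (st : PvSt) (c : Char) : PvSt :=
  if c = '\\' then { st with mode := 1 } else pvEmit st c.toNat

def pvStep (st : PvSt) (c : Char) : PvSt :=
  if st.mode = 1 then
    match pvSimpleEscape c with
    | some b => pvEmit st b
    | none =>
      if pvIsOct c then { st with mode := 2, v := pvOct1 c, k := 1 }
      else pvEmit st c.toNat
  else if st.mode = 2 then
    if pvIsOct c then
      if st.k = 2 then pvEmit st (st.v * 8 + (c.toNat - 48))
      else { st with v := st.v * 8 + (c.toNat - 48), k := st.k + 1 }
    else pvStepBase (pvEmit st st.v) c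
  else pvStepBase st c

def pvEscOk (cs : List Char) : Bool :=
  let st := cs.foldl pvStep ⟨false, 0, 0, 0, 0, 0, 0⟩
  let st' := if st.mode = 1 then pvEmit st 92
             else if st.mode = 2 then pvEmit st st.v
             else st
  !st'.fail && st'.need = 0

def pvLineOk (raw : List Char) : Bool :=
  let line := PySem.Chars.rstrip raw
  if line.length < 4 then true
  else
    let body := PySem.Chars.strip (pvArrowTail (PySem.List.slice line (some 3) none))
    if decide (2 ≤ body.length) && PySem.Chars.startswith body ['"'] && PySem.Chars.endswith body ['"'] then
      pvEscOk (PySem.List.slice body (some 1) (some (-1)))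
    else true

def Pre_parse_status_paths_py (status_output : String) : Prop :=
  (PySem.Chars.splitlines status_output.toList).all pvLineOk = true
instance (status_output : String) : Decidable (Pre_parse_status_paths_py status_output) := by
  unfold Pre_parse_status_paths_py; infer_instance

def pvWitness_parse_status_paths_py : String := "?? \"a\\tb\"\nR  old -> new"

def Spec_parse_status_paths_py (status_output : String) (out : List String) : Prop := out = parse_status_paths_py_alt status_output
instance (status_output : String) (out : List String) : Decidable (Spec_parse_status_paths_py status_output out) := by unfold Spec_parse_status_paths_py; infer_instance

-- ===== CLAIM (what is proved, stated in full; the proofs are below) =====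
def Claim_equal_parse_status_paths_py : Prop := ∀ (status_output : String), Dom_parse_status_paths_py status_output → Pre_parse_status_paths_py status_output → Spec_parse_status_paths_py status_output (parse_status_paths_py status_output)

-- ===== LEMMAS AND PROOFS =====

-- proof-side spec of body.split("\\"): first piece and remaining pieces
def pvSplit1 : List Char → List Char × List (List Char)
  | [] => ([], [])
  | c :: r =>
    if c = '\\' then ([], (pvSplit1 r).1 :: (pvSplit1 r).2)
    else (c :: (pvSplit1 r).1, (pvSplit1 r).2)

theorem pvSplitOn_go_backslash (fuel : Nat) :
    ∀ (l cur : List Char) (acc : List (List Char)), l.length ≤ fuel →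
    PySem.Chars.splitOn.go ['\\'] fuel l cur acc
      = acc.reverse ++ (cur.reverse ++ (pvSplit1 l).1) :: (pvSplit1 l).2 := by
  induction fuel with
  | zero =>
    intro l cur acc h
    have : l = [] := List.eq_nil_of_length_eq_zero (Nat.le_zero.mp h)
    subst this
    simp [PySem.Chars.splitOn.go, pvSplit1]
  | succ n ih =>
    intro l cur acc h
    cases l with
    | nil => simp [PySem.Chars.splitOn.go, pvSplit1]
    | cons c rest =>
      rw [PySem.Chars.splitOn.go]
      by_cases hc : c = '\\'
      · subst hc
        simp only [List.isPrefixOf, beq_self_eq_true, Bool.true_and, if_pos, List.length_cons,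
          List.length_nil, List.drop_succ_cons, List.drop_zero]
        rw [ih rest [] (cur.reverse :: acc) (by simpa using Nat.le_of_succ_le_succ (by simpa using h))]
        simp [pvSplit1]
      · have hp : ['\\'].isPrefixOf (c :: rest) = false := by
          simp [List.isPrefixOf]; exact fun hh => hc hh.symm
        simp only [hp, Bool.false_eq_true, if_false]
        rw [ih rest (c :: cur) acc (by simpa using Nat.le_of_succ_le_succ (by simpa using h))]
        simp [pvSplit1, hc]
theorem pvSplitOn_backslash (l : List Char) :
    PySem.Chars.splitOn l ['\\'] = (pvSplit1 l).1 :: (pvSplit1 l).2 := by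
  unfold PySem.Chars.splitOn
  rw [pvSplitOn_go_backslash (l.length + 1) l [] [] (by omega)]
  simp

theorem pvIsOct_ne_backslash {c : Char} (h : pvIsOct c = true) : ¬ (c = '\\') := by
  intro hc; subst hc; simp [pvIsOct, Char.le_def] at h

theorem pvSimpleEscape_none_ne {c : Char} (h : pvSimpleEscape c = none) : ¬ (c = '\\') := by
  intro hc; subst hc; simp [pvSimpleEscape] at h

theorem pvDecLoop_eq (cs : List Char) :
    pvDecLoopA cs = (pvSplit1 cs).1.map Char.toNat ++ pvDecLoopB (pvSplit1 cs).2 := by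
  fun_induction pvDecLoopA cs with
  | case1 => simp [pvSplit1, pvDecLoopB]
  | case2 c rest hc ih =>
    simp [pvSplit1, hc, ih]
  | case3 c hc =>
    -- c = '\\', rest = []
    simp at hc; subst hc
    simp [pvSplit1, pvDecLoopB]
  | case4 c hc e rest2 b hb ih =>
    simp at hc; subst hc
    by_cases he : e = '\\'
    · subst he
      have : b = 92 := by simp [pvSimpleEscape] at hb; omega
      subst this
      simp only [pvSplit1]
      cases h1 : pvSplit1 rest2 with
      | mk t0 ts => simp [pvDecLoopB, ih, h1]
    · simp only [pvSplit1, if_neg he]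
      simp [pvDecLoopB, pvDecTokB, hb, ih]
  | case5 c hc e hb hoct ih =>
    -- rest2 = []
    simp at hc; subst hc
    have he := pvSimpleEscape_none_ne hb
    simp [pvSplit1, he, pvDecLoopB, pvDecTokB, hb, hoct, pvDecLoopA]
  | case6 c hc e hb hoct d2 hoct2 ih =>
    -- rest3 = []
    simp at hc; subst hc
    have he := pvSimpleEscape_none_ne hb
    have hd2 := pvIsOct_ne_backslash hoct2
    simp [pvSplit1, he, hd2, pvDecLoopB, pvDecTokB, hb, hoct, hoct2, pvDecLoopA]
  | case7 c hc e hb hoct d2 hoct2 d3 rest4 hoct3 ih =>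
    simp at hc; subst hc
    have he := pvSimpleEscape_none_ne hb
    have hd2 := pvIsOct_ne_backslash hoct2
    have hd3 := pvIsOct_ne_backslash hoct3
    simp [pvSplit1, he, hd2, hd3, pvDecLoopB, pvDecTokB, hb, hoct, hoct2, hoct3, ih]
  | case8 c hc e hb hoct d2 hoct2 d3 rest4 hoct3 ih =>
    -- d3 not octal
    simp at hc; subst hc
    have he := pvSimpleEscape_none_ne hb
    have hd2 := pvIsOct_ne_backslash hoct2
    by_cases hd3 : d3 = '\\'
    · subst hd3
      simp only [pvSplit1, if_neg he, if_neg hd2]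
      cases h1 : pvSplit1 rest4 with
      | mk t0 ts => simp [pvDecLoopB, pvDecTokB, hb, hoct, hoct2, ih, h1, pvSplit1]
    · simp [pvSplit1, he, hd2, hd3, pvDecLoopB, pvDecTokB, hb, hoct, hoct2, hoct3, ih]
  | case9 c hc e hb hoct d2 rest3 hoct2 ih =>
    -- d2 not octal
    simp at hc; subst hc
    have he := pvSimpleEscape_none_ne hb
    by_cases hd2 : d2 = '\\'
    · subst hd2
      simp only [pvSplit1, if_neg he]
      cases h1 : pvSplit1 rest3 with
      | mk t0 ts => simp [pvDecLoopB, pvDecTokB, hb, hoct, ih, h1, pvSplit1]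
    · simp [pvSplit1, he, hd2, pvDecLoopB, pvDecTokB, hb, hoct, hoct2, ih]
  | case10 c hc e rest2 hb hoct ih =>
    -- not octal, not simple
    simp at hc; subst hc
    have he := pvSimpleEscape_none_ne hb
    cases rest2 with
    | nil => simp [pvSplit1, he, pvDecLoopB, pvDecTokB, hb, hoct, pvDecLoopA]
    | cons d2 rest3 =>
      by_cases hd2 : d2 = '\\'
      · subst hd2
        simp only [pvSplit1, if_neg he]
        cases h1 : pvSplit1 rest3 with
        | mk t0 ts => simp [pvDecLoopB, pvDecTokB, hb, hoct, ih, h1, pvSplit1]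
      · simp only [pvSplit1, if_neg he, if_neg hd2]
        simp [pvDecLoopB, pvDecTokB, hb, hoct, ih, pvSplit1, hd2]

theorem pvDecodeQuoted_eq : pvDecodeQuotedA = pvDecodeQuotedB := by
  funext path_text
  unfold pvDecodeQuotedA pvDecodeQuotedB
  simp only [pvSplitOn_backslash, pvDecLoop_eq]

theorem pvFoldl_add_eq (ls : List (List Char)) :
    ∀ (acc : PySem.Set String),
    ls.foldl
      (fun paths raw_line =>
        let line := PySem.Chars.rstrip raw_line
        if line.length < 4 then paths
        else
          let body := pvArrowTail (PySem.List.slice line (some 3) none)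
          let normalized := pvDecodeQuotedB (PySem.Chars.strip body)
          if normalized.isEmpty then paths
          else PySem.Set.add paths (String.ofList normalized)) acc
    = (((((ls.map PySem.Chars.rstrip).filter (fun l => decide (4 ≤ l.length))).map pvTarget).filter
         (fun p => !p.isEmpty)).map String.ofList).foldl PySem.Set.add acc := by
  induction ls with
  | nil => intro acc; rfl
  | cons raw rest ih =>
    intro acc
    simp only [List.foldl_cons, List.map_cons]
    by_cases hlen : (PySem.Chars.rstrip raw).length < 4
    · rw [if_pos hlen, List.filter_cons_of_neg (by simp; omega), ih]
    · rw [if_neg hlen, List.filter_cons_of_pos (by simp; omega), List.map_cons]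
      by_cases hemp : (pvDecodeQuotedB (PySem.Chars.strip
          (pvArrowTail (PySem.List.slice (PySem.Chars.rstrip raw) (some 3) none)))).isEmpty
      · rw [if_pos hemp, List.filter_cons_of_neg (by simp [pvTarget]; simp at hemp; exact hemp), ih]
      · rw [if_neg hemp, List.filter_cons_of_pos (by simp [pvTarget]; simp at hemp; exact hemp),
          List.map_cons, List.foldl_cons, ih]
        rfl

-- ===== VERDICT (by name: the statement is the Claim_ definition above) =====
theorem parse_status_paths_py_spec : Claim_equal_parse_status_paths_py := by
  intro s _ _
  unfold Spec_parse_status_paths_py parse_status_paths_py parse_status_paths_py_alt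
  rw [pvDecodeQuoted_eq]
  rw [pvFoldl_add_eq]
  rfl
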